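-- pv_equiv track=rewrite | github.com/kbseah/phyloblitz | src/phyloblitz/report.py | lists_common_prefix
-- ===== SOURCE A (Python) =====
-- def lists_common_prefix(lol):
--     """Get common prefix in a list of lists
--
--     :param lol: list of lists of strings
--     :returns: list of the common prefix
--     :rtype: list
--     """
--     out = []
--     for j in range(min([len(l) for l in lol])):
--         s = set([i[j] for i in lol])
--         if len(s) == 1:
--             out.append(s.pop())
--         else:
--             break
--     return out
-- ===== SOURCE B (Python) =====
-- def lists_common_prefix(lol):
--     """Get common prefix in a list of lists
--
--     :param lol: list of lists of strings
--     :returns: list of the common prefix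
--     :rtype: list
--     """
--     def common(a, b):
--         out = []
--         for x, y in zip(a, b):
--             if x != y:
--                 break
--             out.append(x)
--         return out
--
--     acc = list(lol[0])
--     for b in lol[1:]:
--         acc = common(acc, b)
--     return acc
-- ===== Notes on version B (the rewrite author's own statement) =====
-- stated objective: alternative
-- what changed: Column-by-column scan that builds a set of the j-th elements of all lists is replaced by a pairwise fold: a zip-based two-list common-prefix helper reduced over the list of lists, removing the per-column set construction.
import Mathlib
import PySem

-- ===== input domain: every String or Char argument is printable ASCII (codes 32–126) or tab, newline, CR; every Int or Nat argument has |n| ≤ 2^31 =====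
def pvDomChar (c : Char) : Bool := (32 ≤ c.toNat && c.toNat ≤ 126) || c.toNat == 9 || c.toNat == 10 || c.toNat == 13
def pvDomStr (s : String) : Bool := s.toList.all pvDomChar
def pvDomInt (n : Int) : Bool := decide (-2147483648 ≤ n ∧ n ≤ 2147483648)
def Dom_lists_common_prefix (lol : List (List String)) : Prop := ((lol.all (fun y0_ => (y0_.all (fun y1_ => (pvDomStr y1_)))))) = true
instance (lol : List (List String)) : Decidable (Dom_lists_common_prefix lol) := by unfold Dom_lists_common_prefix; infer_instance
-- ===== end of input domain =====

-- B replaces A's column-wise scan (a set of the j-th elements of every list) by a pairwise fold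
-- of a zip-based two-list common-prefix helper; same cost, different decomposition.

-- ===== PORT A =====
-- the loop 'for j in range(m): s = set([i[j] for i in lol]); if len(s) == 1: out.append(s.pop()) else: break'
-- (the loop only runs for j < m ≤ len(i) for every i in lol, so i[j] is in range and List.getD is exact;
--  s.pop() on a one-element set is that element, here the head of the PySem.Set)
def pvLoopA (lol : List (List String)) (m : Nat) (out : List String) (j : Nat) : List String :=
  if j < m then
    let s : PySem.Set String := PySem.Set.ofList (lol.map (fun i => i.getD j ""))
    if s.length = 1 then pvLoopA lol m (out ++ [s.headD ""]) (j + 1) else out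
  else out
  termination_by m - j

def lists_common_prefix (lol : List (List String)) : List String :=
  -- min([len(l) for l in lol]); the ValueError on empty lol is excluded by Pre_
  let m : Nat := ((lol.map List.length).min?).getD 0
  pvLoopA lol m [] 0

-- ===== PORT B =====
-- helper common(a, b): iterate zip(a, b), append while equal, break at the first mismatch
def pvCommon : List String → List String → List String
  | x :: xs, y :: ys => if x = y then x :: pvCommon xs ys else []
  | _, _ => []

def lists_common_prefix_alt (lol : List (List String)) : List String :=
  -- acc = list(lol[0]); for b in lol[1:]: acc = common(acc, b)  (IndexError of lol[0] on [] excluded by Pre_)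
  lol.tail.foldl pvCommon (lol.headD [])

-- ===== PRECONDITION & SPEC =====
-- Pre_ excludes only the empty list, on which Python A raises ValueError (min() of an empty sequence)
-- and Python B raises IndexError.
def Pre_lists_common_prefix (lol : List (List String)) : Prop := lol ≠ []
instance (lol : List (List String)) : Decidable (Pre_lists_common_prefix lol) := by
  unfold Pre_lists_common_prefix; infer_instance

def pvWitness_lists_common_prefix : List (List String) := [["a", "b"], ["a", "c"]]

def Spec_lists_common_prefix (lol : List (List String)) (out : List String) : Prop := out = lists_common_prefix_alt lol
instance (lol : List (List String)) (out : List String) : Decidable (Spec_lists_common_prefix lol out) := by unfold Spec_lists_common_prefix; infer_instance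

-- ===== CLAIM (what is proved, stated in full; the proofs are below) =====
def Claim_equal_lists_common_prefix : Prop := ∀ (lol : List (List String)), Dom_lists_common_prefix lol → Pre_lists_common_prefix lol → Spec_lists_common_prefix lol (lists_common_prefix lol)

-- ===== LEMMAS AND PROOFS =====

-- reference: peel columns off the first list while every other list starts with the same element
def pvPeel : List String → List (List String) → List String
  | [], _ => []
  | x :: xs, rest =>
    if rest.all (fun b => b.head? == some x) then x :: pvPeel xs (rest.map List.tail)
    else []

lemma pvPeel_nil (a : List String) : pvPeel a [] = a := by
  induction a with
  | nil => rfl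
  | cons x xs ih => simp [pvPeel, ih]

-- B side: folding pvCommon prepends the folded list to pvPeel's list of constraints
lemma pvPeel_common (a b : List String) (rs : List (List String)) :
    pvPeel (pvCommon a b) rs = pvPeel a (b :: rs) := by
  induction a generalizing b rs with
  | nil => cases b <;> simp [pvCommon, pvPeel]
  | cons x xs ih =>
    cases b with
    | nil => simp [pvCommon, pvPeel]
    | cons y ys =>
      by_cases hxy : x = y
      · subst hxy
        have hL : pvPeel (x :: pvCommon xs ys) rs =
            if rs.all (fun b => b.head? == some x) then
              x :: pvPeel (pvCommon xs ys) (rs.map List.tail) else [] := rfl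
        have hR : pvPeel (x :: xs) ((x :: ys) :: rs) =
            if ((x :: ys) :: rs).all (fun b => b.head? == some x) then
              x :: pvPeel xs (((x :: ys) :: rs).map List.tail) else [] := rfl
        rw [pvCommon, if_pos rfl, hL, hR]
        simp only [List.all_cons, List.head?_cons, beq_self_eq_true, Bool.true_and,
          List.map_cons, List.tail_cons]
        split_ifs with h
        · rw [ih]
        · rfl
      · simp [pvCommon, hxy, pvPeel, Ne.symm hxy]

lemma foldl_common_eq_peel (rest : List (List String)) (a : List String) :
    rest.foldl pvCommon a = pvPeel a rest := by
  induction rest generalizing a with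
  | nil => rw [List.foldl_nil, pvPeel_nil]
  | cons b rs ih => rw [List.foldl_cons, ih, pvPeel_common]

-- set([...]) over a nonempty column: the all-equal case collapses to a singleton
lemma ofList_const (c : String) (cs : List String) (h : ∀ x ∈ cs, x = c) :
    PySem.Set.ofList (c :: cs) = [c] := by
  have key : ∀ ds : List String, (∀ x ∈ ds, x = c) → List.foldl PySem.Set.add [c] ds = [c] := by
    intro ds
    induction ds with
    | nil => intro _; rfl
    | cons d ds ih =>
      intro hd
      have hdc : d = c := hd d (by simp)
      subst hdc
      simpa [PySem.Set.add, PySem.Set.contains] using ih (fun x hx => hd x (by simp [hx]))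
  simpa [PySem.Set.ofList_eq_foldl, PySem.Set.add, PySem.Set.empty] using key cs h

-- set([...]) over a nonempty column has one element iff the column is constant
lemma set_singleton_iff (c : String) (cs : List String) :
    (PySem.Set.ofList (c :: cs)).length = 1 ↔ ∀ x ∈ cs, x = c := by
  constructor
  · intro h x hx
    obtain ⟨z, hz⟩ := List.length_eq_one_iff.mp h
    have hc : c ∈ PySem.Set.ofList (c :: cs) := (PySem.Set.mem_ofList _ _).2 (by simp)
    have hx' : x ∈ PySem.Set.ofList (c :: cs) := (PySem.Set.mem_ofList _ _).2 (by simp [hx])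
    rw [hz] at hc hx'
    simp at hc hx'
    rw [hx', hc]
  · intro h
    rw [ofList_const c cs h]
    rfl

lemma set_const_headD (c : String) (cs : List String) (h : ∀ x ∈ cs, x = c) :
    (PySem.Set.ofList (c :: cs)).headD "" = c := by
  rw [ofList_const c cs h]; rfl

-- when some list has length ≤ m, peeling the columns from m on yields nothing
lemma peel_drop_min (a : List String) (rest : List (List String)) (m : Nat)
    (hex : ∃ l ∈ a :: rest, l.length ≤ m) :
    pvPeel (a.drop m) (rest.map (List.drop m)) = [] := by
  rcases hm : a.drop m with _ | ⟨x, xs⟩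
  · rfl
  · -- a has more than m elements, so the short list is in rest
    have ham : ¬ a.length ≤ m := by
      intro hle
      rw [List.drop_eq_nil_of_le hle] at hm
      simp at hm
    obtain ⟨l, hl, hlen⟩ := hex
    rcases List.mem_cons.1 hl with rfl | hlr
    · exact absurd hlen ham
    · have hnil : List.drop m l = [] := List.drop_eq_nil_of_le hlen
      have hmem : ([] : List String) ∈ rest.map (List.drop m) :=
        hnil ▸ List.mem_map_of_mem hlr
      have hall : (rest.map (List.drop m)).all (fun b => b.head? == some x) = false := by
        rw [List.all_eq_false]
        exact ⟨[], hmem, by simp⟩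
      simp [pvPeel, hall]

-- the invariant of A's loop: from column j on it appends exactly pvPeel of the dropped lists
lemma loopA_eq (a : List String) (rest : List (List String)) (m : Nat)
    (hmle : ∀ l ∈ a :: rest, m ≤ l.length) (hmex : ∃ l ∈ a :: rest, l.length ≤ m) :
    ∀ (k j : Nat), j + k = m → ∀ out,
      pvLoopA (a :: rest) m out j = out ++ pvPeel (a.drop j) (rest.map (List.drop j)) := by
  intro k
  induction k with
  | zero =>
    intro j hj out
    have hj' : j = m := by omega
    subst hj'
    rw [pvLoopA, if_neg (Nat.lt_irrefl _), peel_drop_min a rest _ hmex, List.append_nil]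
  | succ k ih =>
    intro j hj out
    have hjm : j < m := by omega
    have hja : j < a.length := lt_of_lt_of_le hjm (hmle a (by simp))
    -- the column at j, with a's entry first
    have hcol : (a :: rest).map (fun i => i.getD j "") =
        a[j] :: rest.map (fun i => i.getD j "") := by
      rw [List.map_cons, List.getD_eq_getElem a "" hja]
    rw [pvLoopA, if_pos hjm]
    simp only [hcol]
    have hdropa : a.drop j = a[j] :: a.drop (j + 1) := List.drop_eq_getElem_cons hja
    by_cases hconst : ∀ x ∈ rest.map (fun i => i.getD j ""), x = a[j]
    · -- constant column: the set is a singleton, A appends a[j] and continues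
      rw [if_pos ((set_singleton_iff _ _).2 hconst), set_const_headD _ _ hconst,
        ih (j + 1) (by omega) (out ++ [a[j]])]
      have hallhead : (rest.map (List.drop j)).all (fun b => b.head? == some a[j]) = true := by
        rw [List.all_eq_true]
        intro b hb
        obtain ⟨l, hl, rfl⟩ := List.mem_map.1 hb
        have hjl : j < l.length := lt_of_lt_of_le hjm (hmle l (by simp [hl]))
        have := hconst (l.getD j "") (List.mem_map_of_mem hl)
        rw [List.getD_eq_getElem l "" hjl] at this
        simp [List.head?_drop, List.getElem?_eq_getElem hjl, this]
      have htails : (rest.map (List.drop j)).map List.tail = rest.map (List.drop (j + 1)) := by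
        simp [List.map_map, Function.comp_def, List.tail_drop]
      rw [hdropa]
      simp [pvPeel, hallhead, htails]
    · -- non-constant column: A stops; peel's guard fails
      rw [if_neg (fun h1 => hconst ((set_singleton_iff _ _).1 h1))]
      simp only [not_forall, exists_prop] at hconst
      obtain ⟨x, hxmem, hxne⟩ := hconst
      obtain ⟨l, hl, rfl⟩ := List.mem_map.1 hxmem
      have hjl : j < l.length := lt_of_lt_of_le hjm (hmle l (by simp [hl]))
      rw [List.getD_eq_getElem l "" hjl] at hxne
      have hallhead : (rest.map (List.drop j)).all (fun b => b.head? == some a[j]) = false := by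
        rw [List.all_eq_false]
        refine ⟨l.drop j, List.mem_map_of_mem hl, ?_⟩
        simp [List.head?_drop, List.getElem?_eq_getElem hjl, hxne]
      rw [hdropa]
      simp [pvPeel, hallhead]

-- ===== VERDICT (by name: the statement is the Claim_ definition above) =====
theorem lists_common_prefix_spec : Claim_equal_lists_common_prefix := by
  intro lol _ hpre
  unfold Spec_lists_common_prefix
  match lol, hpre with
  | a :: rest, _ =>
    obtain ⟨m, hm⟩ := Option.isSome_iff_exists.1
      (List.isSome_min?_of_ne_nil (l := (a :: rest).map List.length) (by simp))
    have hmem := List.min?_mem (xs := (a :: rest).map List.length) hm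
    have hle : ∀ x ∈ (a :: rest).map List.length, m ≤ x := by
      rw [List.min?_eq_some_iff] at hm
      exact hm.2
    have hmle : ∀ l ∈ a :: rest, m ≤ l.length :=
      fun l hl => hle l.length (List.mem_map_of_mem hl)
    have hmex : ∃ l ∈ a :: rest, l.length ≤ m := by
      obtain ⟨l, hl, hlen⟩ := List.mem_map.1 hmem
      exact ⟨l, hl, le_of_eq hlen⟩
    rw [lists_common_prefix]
    simp only [hm, Option.getD_some]
    rw [loopA_eq a rest m hmle hmex m 0 (by omega) [], List.nil_append]
    rw [lists_common_prefix_alt]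
    simp only [List.tail_cons, List.headD_cons, foldl_common_eq_peel, List.drop_zero]
    congr 1
    exact List.map_id'' (fun l => by simp) rest
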